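-- pv_equiv track=rewrite | github.com/tinschert/Gen7_Autochecker | Offline_analizer/CustomerPrj/Restbus/Scripts/pattern_matching.py | findStartBit
-- ===== SOURCE A (Python) =====
-- def findStartBit(startbit, length):# ONLY FOR MOTOROLA arxml
--     """
--
--
--     Args:
--       startbit:
--       length:
--
--     Returns:
--
--     """
--     if length<1:
--         return int(startbit)
--     while length != 1:
--         if startbit % 8 == 0:
--             startbit += 16
--         length -= 1
--         startbit -= 1
--     return int(startbit)
-- ===== SOURCE B (Python) =====
-- def findStartBit(startbit, length):  # ONLY FOR MOTOROLA arxml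
--     # Closed form: each loop step decrements startbit and adds 16 whenever the
--     # current startbit is a multiple of 8; those hits occur at fixed positions.
--     if length < 1:
--         return int(startbit)
--     k = length - 1
--     r = startbit % 8
--     hits = (k - r + 7) // 8 if k > r else 0
--     return int(startbit - k + 16 * hits)
-- ===== Notes on version B (the rewrite author's own statement) =====
-- stated objective: faster
-- what changed: Replaced A's while loop that runs length-1 times with an O(1) closed form: startbit - (length-1) + 16 * (number of iterations whose current bit position is a multiple of 8), computed arithmetically from startbit % 8.
import Mathlib
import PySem

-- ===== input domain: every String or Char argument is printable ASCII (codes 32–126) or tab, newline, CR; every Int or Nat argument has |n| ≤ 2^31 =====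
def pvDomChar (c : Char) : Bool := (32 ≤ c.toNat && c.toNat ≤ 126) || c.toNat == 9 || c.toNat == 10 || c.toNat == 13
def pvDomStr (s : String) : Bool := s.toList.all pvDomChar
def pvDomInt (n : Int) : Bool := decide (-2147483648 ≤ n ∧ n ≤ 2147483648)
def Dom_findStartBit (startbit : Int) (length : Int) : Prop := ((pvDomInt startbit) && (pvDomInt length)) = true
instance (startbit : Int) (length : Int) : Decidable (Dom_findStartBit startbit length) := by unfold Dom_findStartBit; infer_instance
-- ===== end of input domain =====

-- B replaces A's O(length) loop by the O(1) closed form startbit - (length-1) + 16 * (number of loop steps that see a multiple of 8).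

-- ===== PORT A =====
-- the while loop of A, one recursive call per iteration; fuel = number of iterations (length - 1)
def findStartBitLoop : Nat → Int → Int
  | 0, s => s
  | k + 1, s => findStartBitLoop k ((if PySem.Int.mod s 8 = 0 then s + 16 else s) - 1)

def findStartBit (startbit : Int) (length : Int) : Int :=
  if length < 1 then startbit
  else findStartBitLoop (length - 1).toNat startbit

-- ===== PORT B =====
def findStartBit_alt (startbit : Int) (length : Int) : Int :=
  if length < 1 then startbit
  else
    let k := length - 1
    let r := PySem.Int.mod startbit 8
    let hits := if k > r then PySem.Int.floordiv (k - r + 7) 8 else 0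
    startbit - k + 16 * hits

-- ===== PRECONDITION & SPEC =====
def Spec_findStartBit (startbit : Int) (length : Int) (out : Int) : Prop := out = findStartBit_alt startbit length
instance (startbit : Int) (length : Int) (out : Int) : Decidable (Spec_findStartBit startbit length out) := by unfold Spec_findStartBit; infer_instance

-- ===== CLAIM (what is proved, stated in full; the proofs are below) =====
def Claim_equal_findStartBit : Prop := ∀ (startbit : Int) (length : Int), Dom_findStartBit startbit length → Spec_findStartBit startbit length (findStartBit startbit length)

-- ===== LEMMAS AND PROOFS =====

-- closed form of the loop, by induction on the fuel
theorem findStartBitLoop_closed (n : Nat) (s : Int) :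
    findStartBitLoop n s =
      s - n + 16 * (if (n : Int) > s % 8 then ((n : Int) - s % 8 + 7) / 8 else 0) := by
  induction n generalizing s with
  | zero =>
    have h : ¬ ((0 : Int) > s % 8) := by
      have := Int.emod_nonneg s (by norm_num : (8:Int) ≠ 0); omega
    simp [findStartBitLoop, h]
  | succ k ih =>
    have h8 : (0:Int) ≤ s % 8 ∧ s % 8 < 8 :=
      ⟨Int.emod_nonneg s (by norm_num), Int.emod_lt_of_pos s (by norm_num)⟩
    by_cases h0 : s % 8 = 0
    · have hstep : findStartBitLoop (k + 1) s = findStartBitLoop k (s + 16 - 1) := by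
        simp [findStartBitLoop, h0]
      rw [hstep, ih]
      have h15 : (s + 16 - 1) % 8 = 7 := by omega
      rw [h15, h0]
      push_cast
      split_ifs <;> omega
    · have hstep : findStartBitLoop (k + 1) s = findStartBitLoop k (s - 1) := by
        simp [findStartBitLoop, h0]
      rw [hstep, ih]
      have h1 : (s - 1) % 8 = s % 8 - 1 := by omega
      rw [h1]
      push_cast
      split_ifs <;> omega

-- ===== VERDICT (by name: the statement is the Claim_ definition above) =====
theorem findStartBit_spec : Claim_equal_findStartBit := by
  intro startbit length _
  unfold Spec_findStartBit findStartBit findStartBit_alt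
  by_cases hl : length < 1
  · simp [hl]
  · simp only [hl, if_false]
    rw [findStartBitLoop_closed]
    have hk : ((length - 1).toNat : Int) = length - 1 := by omega
    have hmod : PySem.Int.mod startbit 8 = startbit % 8 :=
      PySem.Int.mod_eq_emod_of_pos (by norm_num)
    have hdiv : ∀ a : Int, PySem.Int.floordiv a 8 = a / 8 := fun a =>
      PySem.Int.floordiv_eq_ediv_of_pos (by norm_num)
    simp only [hk, hmod, hdiv]
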